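-- pv_equiv track=rewrite | github.com/anushaasinghh/team-null-pointers | src/components/Aichatbot/bot.py | format_articles_constitution
-- ===== SOURCE A (Python) =====
-- def format_articles_constitution(articles):
--     response = "Here are the articles related to your query:\n"
--     for match in articles:
--         if len(match) == 3:
--             response += f"Article No: {match[0]}\nName: {match[1]}\nDescription: {match[2]}\n\n"
--         elif len(match) == 4:
--             response += f"Article No: {match[0]}\nName: {match[1]}\nClause No: {match[2]}\nClause Description: {match[3]}\n\n"
--         elif len(match) == 6:
--             response += f"Article No: {match[0]}\nName: {match[1]}\nClause No: {match[2]}\nClause Description: {match[3]}\nSub-Clause No: {match[4]}\nSub-Clause Description: {match[5]}\n\n"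
--     return response if articles else "No articles found."
-- ===== SOURCE B (Python) =====
-- def _block(match):
--     n = len(match)
--     if n not in (3, 4, 6):
--         return ""
--     labels = (["Article No", "Name"]
--               + (["Description"] if n == 3 else ["Clause No", "Clause Description"])
--               + (["Sub-Clause No", "Sub-Clause Description"] if n == 6 else []))
--     return "".join(label + ": " + value + "\n" for label, value in zip(labels, match)) + "\n"
--
--
-- def _blocks(articles):
--     if not articles:
--         return ""
--     return _block(articles[0]) + _blocks(articles[1:])
--
--
-- def format_articles_constitution(articles):
--     if not articles:
--         return "No articles found."
--     return "Here are the articles related to your query:\n" + _blocks(articles)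
-- ===== Notes on version B (the rewrite author's own statement) =====
-- stated objective: alternative
-- what changed: Replaces A's single accumulator loop with hard-coded branches by an early return for the empty case plus a recursive back-to-front concatenation of per-match blocks, each block built by composing its label list from shared prefix/middle/suffix pieces and joining label:value lines.
import Mathlib
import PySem

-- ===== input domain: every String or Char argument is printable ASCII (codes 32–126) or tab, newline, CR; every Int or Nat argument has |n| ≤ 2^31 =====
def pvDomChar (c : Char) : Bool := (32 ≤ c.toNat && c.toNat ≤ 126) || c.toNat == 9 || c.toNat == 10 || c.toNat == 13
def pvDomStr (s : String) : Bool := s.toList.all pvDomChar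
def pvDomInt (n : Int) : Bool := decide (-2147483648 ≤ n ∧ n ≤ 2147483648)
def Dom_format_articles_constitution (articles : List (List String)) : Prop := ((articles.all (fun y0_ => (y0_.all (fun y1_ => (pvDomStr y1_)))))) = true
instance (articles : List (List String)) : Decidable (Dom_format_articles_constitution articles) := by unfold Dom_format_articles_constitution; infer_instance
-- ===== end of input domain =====

-- B replaces A's accumulator loop over hard-coded branches by an early return plus a
-- recursive back-to-front concatenation of per-match blocks with composed label lists; objective: alternative.


-- ===== PORT A =====
-- one loop iteration of A: three length-tested f-string branches
def fmtStepA (resp : String) (m : List String) : String :=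
  match m with
  | [a, b, c] =>
      resp ++ ("Article No: " ++ a ++ "\nName: " ++ b ++ "\nDescription: " ++ c ++ "\n\n")
  | [a, b, c, d] =>
      resp ++ ("Article No: " ++ a ++ "\nName: " ++ b ++ "\nClause No: " ++ c ++
               "\nClause Description: " ++ d ++ "\n\n")
  | [a, b, c, d, e, f] =>
      resp ++ ("Article No: " ++ a ++ "\nName: " ++ b ++ "\nClause No: " ++ c ++
               "\nClause Description: " ++ d ++ "\nSub-Clause No: " ++ e ++
               "\nSub-Clause Description: " ++ f ++ "\n\n")
  | _ => resp

def format_articles_constitution (articles : List (List String)) : String :=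
  let response := articles.foldl fmtStepA "Here are the articles related to your query:\n"
  if !articles.isEmpty then response else "No articles found."

-- ===== PORT B =====
-- _block in Source B: label list composed from prefix/middle/suffix pieces, joined label:value lines
def pvBlock (m : List String) : String :=
  let n : Int := Int.ofNat m.length
  if ¬ (n = 3 ∨ n = 4 ∨ n = 6) then ""
  else
    let labels : List String :=
      ["Article No", "Name"]
      ++ (if n = 3 then ["Description"] else ["Clause No", "Clause Description"])
      ++ (if n = 6 then ["Sub-Clause No", "Sub-Clause Description"] else [])
    PySem.Str.join "" ((labels.zip m).map (fun p => p.1 ++ ": " ++ p.2 ++ "\n")) ++ "\n"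

-- _blocks in Source B: recursion on the list, current block prepended to the rest
def pvBlocks (articles : List (List String)) : String :=
  match articles with
  | [] => ""
  | m :: rest => pvBlock m ++ pvBlocks rest

def format_articles_constitution_alt (articles : List (List String)) : String :=
  if articles.isEmpty then "No articles found."
  else "Here are the articles related to your query:\n" ++ pvBlocks articles

-- ===== PRECONDITION & SPEC =====
def Spec_format_articles_constitution (articles : List (List String)) (out : String) : Prop := out = format_articles_constitution_alt articles
instance (articles : List (List String)) (out : String) : Decidable (Spec_format_articles_constitution articles out) := by unfold Spec_format_articles_constitution; infer_instance

-- ===== CLAIM (what is proved, stated in full; the proofs are below) =====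
def Claim_equal_format_articles_constitution : Prop := ∀ (articles : List (List String)), Dom_format_articles_constitution articles → Spec_format_articles_constitution articles (format_articles_constitution articles)

-- ===== LEMMAS AND PROOFS =====
theorem pv_str_ext {s t : String} (h : s.toList = t.toList) : s = t :=
  String.toList_injective h

-- A's loop body appends exactly B's block for that match
set_option maxHeartbeats 1600000 in
theorem fmtStepA_block (resp : String) (m : List String) :
    fmtStepA resp m = resp ++ pvBlock m := by
  match m with
  | [] => simp [fmtStepA, pvBlock]
  | [_] => simp [fmtStepA, pvBlock]
  | [_, _] => simp [fmtStepA, pvBlock]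
  | [a, b, c] =>
      unfold fmtStepA pvBlock
      norm_num
      apply pv_str_ext
      simp [PySem.Str.join, PySem.Chars.join, List.intercalate, List.intersperse]
  | [a, b, c, d] =>
      unfold fmtStepA pvBlock
      norm_num
      apply pv_str_ext
      simp [PySem.Str.join, PySem.Chars.join, List.intercalate, List.intersperse]
  | [_, _, _, _, _] => simp [fmtStepA, pvBlock]
  | [a, b, c, d, e, f] =>
      unfold fmtStepA pvBlock
      norm_num
      apply pv_str_ext
      simp [PySem.Str.join, PySem.Chars.join, List.intercalate, List.intersperse]
  | x0 :: x1 :: x2 :: x3 :: x4 :: x5 :: x6 :: rest =>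
      unfold fmtStepA pvBlock
      have : ¬ ((Int.ofNat (x0 :: x1 :: x2 :: x3 :: x4 :: x5 :: x6 :: rest).length = 3)
          ∨ (Int.ofNat (x0 :: x1 :: x2 :: x3 :: x4 :: x5 :: x6 :: rest).length = 4)
          ∨ (Int.ofNat (x0 :: x1 :: x2 :: x3 :: x4 :: x5 :: x6 :: rest).length = 6)) := by
        simp only [List.length_cons, Int.ofNat_eq_natCast]
        omega
      rw [if_pos this]
      simp

-- A's fold equals the accumulator followed by B's concatenated blocks
theorem foldl_blocks (l : List (List String)) (resp : String) :
    l.foldl fmtStepA resp = resp ++ pvBlocks l := by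
  induction l generalizing resp with
  | nil => simp [pvBlocks]
  | cons m rest ih =>
      simp only [List.foldl_cons, pvBlocks, ih, fmtStepA_block]
      rw [String.append_assoc]

-- ===== VERDICT (by name: the statement is the Claim_ definition above) =====
theorem format_articles_constitution_spec : Claim_equal_format_articles_constitution := by
  intro articles _
  unfold Spec_format_articles_constitution format_articles_constitution format_articles_constitution_alt
  cases articles with
  | nil => rfl
  | cons m rest =>
      simp only [List.isEmpty_cons, Bool.not_false, if_true, if_false, Bool.false_eq_true]
      exact foldl_blocks (m :: rest) _
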